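-- pv_equiv track=rewrite | github.com/krishna-gutam/Continual-Learning-PointCloud | scripts/train.py | build_global_class_map
-- ===== SOURCE A (Python) =====
-- from typing import Dict, List, Sequence, Tuple
--
-- def build_global_class_map(tasks: Sequence[Sequence[str]]) -> Dict[str, int]:
--     """
--     Build a deterministic class->index mapping from tasks list-of-lists.
--     Keeps first appearance order.
--     """
--     order: List[str] = []
--     seen = set()
--     for group in tasks:
--         for c in group:
--             if c not in seen:
--                 seen.add(c)
--                 order.append(c)
--     return {c: i for i, c in enumerate(order)}
-- ===== SOURCE B (Python) =====
-- def build_global_class_map(tasks):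
--     """
--     Build a deterministic class->index mapping from tasks list-of-lists.
--     Keeps first appearance order.
--     """
--     flat = [c for g in tasks for c in g]
--     first = {}
--     for i, c in reversed(list(enumerate(flat))):
--         first[c] = i          # reverse scan: the surviving value is the FIRST index
--     order = sorted(first, key=first.get)
--     return {c: i for i, c in enumerate(order)}
-- ===== Notes on version B (the rewrite author's own statement) =====
-- stated objective: alternative
-- what changed: Instead of an incremental seen-set dedup, B flattens the stream, records each class's first index by a reverse-scan dict overwrite (no membership test), sorts the distinct classes by that first index, and enumerates the sorted order.
import Mathlib
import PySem

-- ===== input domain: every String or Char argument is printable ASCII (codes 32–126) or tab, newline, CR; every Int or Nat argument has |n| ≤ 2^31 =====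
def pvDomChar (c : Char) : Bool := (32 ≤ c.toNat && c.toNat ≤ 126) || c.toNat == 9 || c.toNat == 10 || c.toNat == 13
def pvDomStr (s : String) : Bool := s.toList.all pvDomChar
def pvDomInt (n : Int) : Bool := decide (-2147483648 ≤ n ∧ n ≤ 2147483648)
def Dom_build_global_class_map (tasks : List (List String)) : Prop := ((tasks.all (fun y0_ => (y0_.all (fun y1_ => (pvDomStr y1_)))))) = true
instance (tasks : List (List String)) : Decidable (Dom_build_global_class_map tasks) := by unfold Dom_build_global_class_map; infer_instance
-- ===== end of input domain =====

-- B replaces A's incremental seen-set dedup by a different algorithm: flatten the stream,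
-- record each class's first index by a reverse-scan dict overwrite (no membership test),
-- sort the distinct classes by that first index, then enumerate the sorted order.

-- ===== PORT A =====
def build_global_class_map (tasks : List (List String)) : List (String × Int) :=
  ((PySem.List.enumerate
      (tasks.foldl
        (fun (st : List String × PySem.Set String) group =>
          group.foldl
            (fun (st : List String × PySem.Set String) c =>
              if PySem.Set.contains st.2 c then st
              else (st.1 ++ [c], PySem.Set.add st.2 c))
            st)
        ([], PySem.Set.empty)).1 0).foldl
      (fun (d : PySem.Dict String Int) p => d.insert p.2 p.1)
      PySem.Dict.empty).items

-- ===== PORT B =====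
-- `first.get` in the sort key always hits an existing key here; ported as `getD _ 0`.
def build_global_class_map_alt (tasks : List (List String)) : List (String × Int) :=
  let flat := tasks.foldl (fun acc g => acc ++ g) []
  let first := ((PySem.List.enumerate flat 0).reverse).foldl
      (fun (d : PySem.Dict String Int) p => d.insert p.2 p.1) PySem.Dict.empty
  let order := PySem.List.sorted first.keys (fun c => first.getD c 0) false
  ((PySem.List.enumerate order 0).foldl
      (fun (d : PySem.Dict String Int) p => d.insert p.2 p.1)
      PySem.Dict.empty).items

-- ===== PRECONDITION & SPEC =====
def Spec_build_global_class_map (tasks : List (List String)) (out : List (String × Int)) : Prop := out = build_global_class_map_alt tasks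
instance (tasks : List (List String)) (out : List (String × Int)) : Decidable (Spec_build_global_class_map tasks out) := by unfold Spec_build_global_class_map; infer_instance

-- ===== CLAIM (what is proved, stated in full; the proofs are below) =====
def Claim_equal_build_global_class_map : Prop := ∀ (tasks : List (List String)), Dom_build_global_class_map tasks → Spec_build_global_class_map tasks (build_global_class_map tasks)

-- ===== LEMMAS AND PROOFS =====

/-- Pure spec of one "add class if unseen" step on the first-appearance order list. -/
def pvIns (order : List String) (c : String) : List String :=
  if c ∈ order then order else order ++ [c]

/-- First-appearance dedup of a flat stream. -/
def pvOrd (l : List String) : List String := l.foldl pvIns []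

/-- Index (counting from `i`) of the first occurrence of `c` in `l`. -/
def pvFIdx : List String → Int → String → Option Int
  | [], _, _ => none
  | x :: xs, i, c => if x = c then some i else pvFIdx xs (i + 1) c

/-- `order` tagged with indices starting at `i`. -/
def pvTag : List String → Int → List (String × Int)
  | [], _ => []
  | c :: cs, i => (c, i) :: pvTag cs (i + 1)

theorem pvTag_eq_enumerate (xs : List String) (i : Int) :
    (PySem.List.enumerate xs i).map (fun p => (p.2, p.1)) = pvTag xs i := by
  induction xs generalizing i with
  | nil => simp [PySem.List.enumerate_nil, pvTag]
  | cons c cs ih => simp [PySem.List.enumerate_cons, pvTag, ih]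

theorem pvIns_nodup {order : List String} (c : String) (h : order.Nodup) :
    (pvIns order c).Nodup := by
  unfold pvIns
  split_ifs with hc
  · exact h
  · simp [List.nodup_append, h]
    exact fun a ha he => hc (he ▸ ha)

theorem mem_pvIns {a c : String} {o : List String} : a ∈ pvIns o c ↔ a ∈ o ∨ a = c := by
  unfold pvIns; split_ifs with hc
  · constructor
    · exact Or.inl
    · rintro (h | rfl) <;> [exact h; exact hc]
  · simp

theorem mem_foldl_pvIns (l : List String) :
    ∀ (o : List String) (a : String), a ∈ l.foldl pvIns o ↔ a ∈ o ∨ a ∈ l := by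
  induction l with
  | nil => simp
  | cons c cs ih =>
    intro o a
    simp only [List.foldl_cons, ih, mem_pvIns, List.mem_cons]
    tauto

theorem mem_pvOrd (l : List String) (a : String) : a ∈ pvOrd l ↔ a ∈ l := by
  simp [pvOrd, mem_foldl_pvIns]

theorem pvOrd_nodup (l : List String) : (pvOrd l).Nodup := by
  unfold pvOrd
  have : ∀ o : List String, o.Nodup → (l.foldl pvIns o).Nodup := by
    induction l with
    | nil => exact fun o h => h
    | cons c cs ih => exact fun o h => ih _ (pvIns_nodup c h)
  exact this [] List.nodup_nil

theorem pvOrd_append_singleton (l : List String) (c : String) :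
    pvOrd (l ++ [c]) = pvIns (pvOrd l) c := by
  simp [pvOrd, List.foldl_append]

theorem pvFlat_acc (gs : List (List String)) :
    ∀ acc : List String,
      gs.foldl (fun acc g => acc ++ g) acc = acc ++ gs.foldl (fun acc g => acc ++ g) [] := by
  induction gs with
  | nil => simp
  | cons h hs ih2 =>
    intro acc
    simp only [List.foldl_cons, List.nil_append]
    rw [ih2 (acc ++ h), ih2 h, List.append_assoc]

/-- A's nested fold over the groups is the fold over the flattened stream. -/
theorem foldl_pvIns_flatten (ts : List (List String)) :
    ∀ o : List String,
      ts.foldl (fun o g => g.foldl pvIns o) o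
        = (ts.foldl (fun acc g => acc ++ g) []).foldl pvIns o := by
  induction ts with
  | nil => intro o; rfl
  | cons g gs ih =>
    intro o
    simp only [List.foldl_cons, List.nil_append]
    rw [ih (g.foldl pvIns o), pvFlat_acc gs g, List.foldl_append]

/-- first-occurrence index lemmas -/
theorem pvFIdx_eq_none (l : List String) :
    ∀ (i : Int) (c : String), pvFIdx l i c = none ↔ c ∉ l := by
  induction l with
  | nil => simp [pvFIdx]
  | cons x xs ih =>
    intro i c
    simp only [pvFIdx, List.mem_cons]
    split_ifs with h
    · simp [h.symm]
    · rw [ih]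
      constructor
      · rintro hn (rfl | hm) <;> [exact h rfl; exact hn hm]
      · exact fun hn hm => hn (Or.inr hm)

theorem pvFIdx_bound (l : List String) :
    ∀ (i : Int) (c : String), c ∈ l →
      ∃ j, pvFIdx l i c = some j ∧ i ≤ j ∧ j < i + l.length := by
  induction l with
  | nil => simp
  | cons x xs ih =>
    intro i c hc
    simp only [pvFIdx]
    split_ifs with h
    · exact ⟨i, rfl, le_refl i, by simp only [List.length_cons]; omega⟩
    · have hm : c ∈ xs := by
        rcases List.mem_cons.mp hc with rfl | hm
        · exact absurd rfl h
        · exact hm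
      obtain ⟨j, hj, h1, h2⟩ := ih (i + 1) c hm
      exact ⟨j, hj, by omega, by simp only [List.length_cons] at *; push_cast at *; omega⟩

theorem pvFIdx_append_of_mem (l : List String) :
    ∀ (i : Int) (c a : String), a ∈ l → pvFIdx (l ++ [c]) i a = pvFIdx l i a := by
  induction l with
  | nil => simp
  | cons x xs ih =>
    intro i c a ha
    simp only [List.cons_append, pvFIdx]
    split_ifs with h
    · rfl
    · have hm : a ∈ xs := by
        rcases List.mem_cons.mp ha with rfl | hm
        · exact absurd rfl h
        · exact hm
      exact ih (i + 1) c a hm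

theorem pvFIdx_append_self_of_not_mem (l : List String) :
    ∀ (i : Int) (c : String), c ∉ l → pvFIdx (l ++ [c]) i c = some (i + l.length) := by
  induction l with
  | nil => intro i c _; simp [pvFIdx]
  | cons x xs ih =>
    intro i c hc
    simp only [List.cons_append, pvFIdx]
    rw [if_neg (fun h => hc (by simp [h]))]
    rw [ih (i + 1) c (fun h => hc (by simp [h]))]
    simp; ring_nf

/-- The dedup order is strictly increasing under first-occurrence index. -/
theorem pvOrd_pairwise (l : List String) :
    (pvOrd l).Pairwise
      (fun a b => (pvFIdx l 0 a).getD 0 < (pvFIdx l 0 b).getD 0) := by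
  induction l using List.reverseRecOn with
  | nil => simp [pvOrd]
  | append_singleton l c ih =>
    rw [pvOrd_append_singleton]
    unfold pvIns
    split_ifs with hc
    · refine ih.imp_of_mem ?_
      intro a b ha hb hlt
      rw [pvFIdx_append_of_mem l 0 c a ((mem_pvOrd l a).mp ha),
          pvFIdx_append_of_mem l 0 c b ((mem_pvOrd l b).mp hb)]
      exact hlt
    · rw [List.pairwise_append]
      refine ⟨?_, List.pairwise_singleton _ _, ?_⟩
      · refine ih.imp_of_mem ?_
        intro a b ha hb hlt
        rw [pvFIdx_append_of_mem l 0 c a ((mem_pvOrd l a).mp ha),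
            pvFIdx_append_of_mem l 0 c b ((mem_pvOrd l b).mp hb)]
        exact hlt
      · intro a ha b hb
        have hb' : b = c := List.mem_singleton.mp hb
        rw [hb']
        have hal : a ∈ l := (mem_pvOrd l a).mp ha
        have hcl : c ∉ l := fun h => hc ((mem_pvOrd l c).mpr h)
        rw [pvFIdx_append_of_mem l 0 c a hal,
            pvFIdx_append_self_of_not_mem l 0 c hcl]
        obtain ⟨j, hj, h1, h2⟩ := pvFIdx_bound l 0 a hal
        rw [hj]
        simpa using h2

/-- The reverse-scan overwrite dict: as a foldr over the enumerated stream. -/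
def pvRevD (l : List String) (i : Int) : PySem.Dict String Int :=
  (PySem.List.enumerate l i).foldr (fun p d => d.insert p.2 p.1) PySem.Dict.empty

theorem pvRevD_get? (l : List String) :
    ∀ (i : Int) (c : String), (pvRevD l i).get? c = pvFIdx l i c := by
  induction l with
  | nil => intro i c; simp [pvRevD, PySem.List.enumerate_nil, pvFIdx]
  | cons x xs ih =>
    intro i c
    simp only [pvRevD, PySem.List.enumerate_cons, List.foldr_cons, pvFIdx]
    rw [PySem.Dict.get?_insert]
    by_cases h : x = c
    · simp [h]
    · rw [if_neg (fun hh => h hh.symm)]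
      rw [if_neg h]
      exact ih (i + 1) c

theorem pvRevD_keys_nodup (l : List String) :
    ∀ i : Int, (pvRevD l i).keys.Nodup := by
  induction l with
  | nil => intro i; simp [pvRevD, PySem.List.enumerate_nil]
  | cons x xs ih =>
    intro i
    simp only [pvRevD, PySem.List.enumerate_cons, List.foldr_cons]
    exact PySem.Dict.nodup_keys_insert _ _ _ (ih (i + 1))

theorem pvRevD_mem_keys (l : List String) :
    ∀ (i : Int) (c : String), c ∈ (pvRevD l i).keys ↔ c ∈ l := by
  intro i c
  rw [← PySem.Dict.contains_iff_mem_keys]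
  constructor
  · intro h
    have := PySem.Dict.contains_eq_isSome_get? (pvRevD l i) c
    rw [h, pvRevD_get?] at this
    by_contra hm
    rw [(pvFIdx_eq_none l i c).mpr hm] at this
    simp at this
  · intro h
    obtain ⟨j, hj, _, _⟩ := pvFIdx_bound l i c h
    have := PySem.Dict.contains_eq_isSome_get? (pvRevD l i) c
    rw [pvRevD_get?, hj] at this
    simp [this]

theorem pvRevD_getD (l : List String) (i : Int) (c : String) :
    (pvRevD l i).getD c 0 = (pvFIdx l i c).getD 0 := by
  rw [PySem.Dict.getD_eq_get?_getD, pvRevD_get?]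

/-- Sorting the dict's keys by recorded first index gives exactly the dedup order. -/
theorem sorted_keys_eq_pvOrd (l : List String) :
    PySem.List.sorted (pvRevD l 0).keys (fun c => (pvRevD l 0).getD c 0) false = pvOrd l := by
  apply PySem.List.sorted_eq_of_perm_of_pairwise_lt
  · rw [List.perm_ext_iff_of_nodup (pvOrd_nodup l) (pvRevD_keys_nodup l 0)]
    intro a
    rw [mem_pvOrd, pvRevD_mem_keys]
  · refine (pvOrd_pairwise l).imp_of_mem ?_
    intro a b ha hb hlt
    rw [pvRevD_getD l 0 a, pvRevD_getD l 0 b]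
    exact hlt

/-- A's inner loop over a group keeps `seen = order` and performs `pvIns` steps. -/
theorem a_inner (g : List String) :
    ∀ order : List String,
      g.foldl
        (fun (st : List String × PySem.Set String) c =>
          if PySem.Set.contains st.2 c then st
          else (st.1 ++ [c], PySem.Set.add st.2 c))
        (order, order)
      = (g.foldl pvIns order, g.foldl pvIns order) := by
  induction g with
  | nil => intro order; rfl
  | cons c cs ih =>
    intro order
    simp only [List.foldl_cons]
    by_cases hc : c ∈ order
    · rw [show (if PySem.Set.contains ((order, order) : List String × PySem.Set String).2 c then ((order, order) : List String × PySem.Set String)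
            else (order ++ [c], PySem.Set.add order c)) = (order, order) by
          simp [PySem.Set.contains, hc]]
      rw [show pvIns order c = order by simp [pvIns, hc]]
      exact ih order
    · rw [show (if PySem.Set.contains ((order, order) : List String × PySem.Set String).2 c then ((order, order) : List String × PySem.Set String)
            else (order ++ [c], PySem.Set.add order c)) = (order ++ [c], order ++ [c]) by
          simp [PySem.Set.contains, PySem.Set.add, hc]]
      rw [show pvIns order c = order ++ [c] by simp [pvIns, hc]]
      exact ih (order ++ [c])

/-- A's outer loop, with both state components equal, in terms of `pvIns`. -/
theorem a_outer (ts : List (List String)) :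
    ∀ order : List String,
      ts.foldl
        (fun (st : List String × PySem.Set String) group =>
          group.foldl
            (fun (st : List String × PySem.Set String) c =>
              if PySem.Set.contains st.2 c then st
              else (st.1 ++ [c], PySem.Set.add st.2 c))
            st)
        (order, order)
      = (ts.foldl (fun o g => g.foldl pvIns o) order,
         ts.foldl (fun o g => g.foldl pvIns o) order) := by
  induction ts with
  | nil => intro order; rfl
  | cons g gs ih =>
    intro order
    simp only [List.foldl_cons]
    rw [a_inner g order]
    exact ih (g.foldl pvIns order)

/-- The final dict comprehension over `enumerate order` has items `pvTag order 0`. -/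
theorem items_enum_fold (order : List String) (h : order.Nodup) :
    ((PySem.List.enumerate order 0).foldl
      (fun (d : PySem.Dict String Int) p => d.insert p.2 p.1)
      PySem.Dict.empty).items = pvTag order 0 := by
  have hfresh : ∀ a ∈ PySem.List.enumerate order 0,
      (PySem.Dict.empty : PySem.Dict String Int).contains a.2 = false := by
    intro a _; simp
  have hnodk : ((PySem.List.enumerate order 0).map (·.2)).Nodup := by
    rw [PySem.List.map_snd_enumerate]; exact h
  rw [PySem.Dict.items_foldl_insert_fresh _ _ _ _ hfresh hnodk]
  simp [← pvTag_eq_enumerate]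
  rfl

-- ===== VERDICT (by name: the statement is the Claim_ definition above) =====
theorem build_global_class_map_spec : Claim_equal_build_global_class_map := by
  intro tasks _
  unfold Spec_build_global_class_map build_global_class_map build_global_class_map_alt
  rw [show (([], PySem.Set.empty) : List String × PySem.Set String)
        = (([] : List String), ([] : List String)) from rfl, a_outer]
  set flat := tasks.foldl (fun acc g => acc ++ g) [] with hflat
  have hA : tasks.foldl (fun o g => g.foldl pvIns o) [] = pvOrd flat := by
    rw [foldl_pvIns_flatten]; rfl
  simp only
  rw [hA, items_enum_fold (pvOrd flat) (pvOrd_nodup flat)]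
  have hd : ((PySem.List.enumerate flat 0).reverse).foldl
      (fun (d : PySem.Dict String Int) p => d.insert p.2 p.1) PySem.Dict.empty
      = pvRevD flat 0 := by
    rw [List.foldl_reverse]; rfl
  rw [hd, sorted_keys_eq_pvOrd, items_enum_fold (pvOrd flat) (pvOrd_nodup flat)]
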